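-- pv_equiv track=rewrite | github.com/medema-group/BiG-SCAPE | big_scape/data/sqlite.py | text_to_queries
-- ===== SOURCE A (Python) =====
-- def text_to_queries(schema_lines: list[str]) -> list[str]:
--     """Convert list of lines from an .sql file to a list of queries
--
--     Args:
--         schema_lines (list[str]): list of lines from an .sql file
--
--     Returns:
--         list[str]: list of queries that can be executed
--     """
--     create_queries = []
--     query_lines = []
--     for line in schema_lines:
--         query_lines.append(line)
--         if not line.rstrip().endswith(";"):
--             continue
--         creation_query = "".join(query_lines)
--         create_queries.append(creation_query)
--         query_lines = []
--     return create_queries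
-- ===== SOURCE B (Python) =====
-- def text_to_queries(schema_lines: list[str]) -> list[str]:
--     """Convert list of lines from an .sql file to a list of queries."""
--     boundaries = [i for i, line in enumerate(schema_lines) if line.rstrip().endswith(";")]
--     create_queries = []
--     start = 0
--     for b in boundaries:
--         create_queries.append("".join(schema_lines[start:b + 1]))
--         start = b + 1
--     return create_queries
-- ===== Notes on version B (the rewrite author's own statement) =====
-- stated objective: alternative
-- what changed: Replaced the single fold that carries a pending-lines accumulator with a two-pass decomposition: first collect the indices of semicolon-terminated lines, then slice-and-join the original list between consecutive boundaries.
import Mathlib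
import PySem

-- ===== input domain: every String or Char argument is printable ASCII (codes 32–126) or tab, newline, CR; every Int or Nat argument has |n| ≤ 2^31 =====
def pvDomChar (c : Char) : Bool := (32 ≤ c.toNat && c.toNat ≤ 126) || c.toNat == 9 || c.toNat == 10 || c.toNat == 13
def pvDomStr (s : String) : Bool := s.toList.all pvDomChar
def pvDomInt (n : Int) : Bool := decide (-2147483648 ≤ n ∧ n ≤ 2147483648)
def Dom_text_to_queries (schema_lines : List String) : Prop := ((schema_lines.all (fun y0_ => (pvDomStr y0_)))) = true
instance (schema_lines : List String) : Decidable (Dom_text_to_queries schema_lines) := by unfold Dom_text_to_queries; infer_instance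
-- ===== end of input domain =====

-- B replaces A's running pending-lines accumulator by a two-pass decomposition:
-- collect boundary indices first, then slice-and-join between consecutive boundaries.

-- ===== PORT A =====
-- the terminator test `line.rstrip().endswith(";")`, shared by both ports
def pvIsB (line : String) : Bool := PySem.Str.endswith (PySem.Str.rstrip line) ";"

-- loop body of A; fold state: (create_queries, query_lines)
def pvStepA (st : List String × List String) (line : String) : List String × List String :=
  let query_lines := st.2 ++ [line]
  if pvIsB line = false then
    (st.1, query_lines)
  else
    (st.1 ++ [PySem.Str.join "" query_lines], [])

def text_to_queries (schema_lines : List String) : List String :=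
  (schema_lines.foldl pvStepA ([], [])).1

-- ===== PORT B =====
-- loop body of B; fold state: (create_queries, start)
def pvStepB (schema_lines : List String) (st : List String × Int) (b : Int) :
    List String × Int :=
  (st.1 ++ [PySem.Str.join "" (PySem.List.slice schema_lines (some st.2) (some (b + 1)))],
   b + 1)

def text_to_queries_alt (schema_lines : List String) : List String :=
  let boundaries : List Int :=
    (PySem.List.enumerate schema_lines 0).filterMap
      (fun p => if pvIsB p.2 then some p.1 else none)
  (boundaries.foldl (pvStepB schema_lines) ([], 0)).1

-- ===== PRECONDITION & SPEC =====
def Spec_text_to_queries (schema_lines : List String) (out : List String) : Prop := out = text_to_queries_alt schema_lines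
instance (schema_lines : List String) (out : List String) : Decidable (Spec_text_to_queries schema_lines out) := by unfold Spec_text_to_queries; infer_instance

-- ===== CLAIM (what is proved, stated in full; the proofs are below) =====
def Claim_equal_text_to_queries : Prop := ∀ (schema_lines : List String), Dom_text_to_queries schema_lines → Spec_text_to_queries schema_lines (text_to_queries schema_lines)

-- ===== LEMMAS AND PROOFS =====

-- canonical recursive form: pend = pending lines, emit join(pend++[l]) at each boundary
def pvAux (pend : List String) : List String → List String
  | [] => []
  | l :: ls =>
    if pvIsB l then
      PySem.Str.join "" (pend ++ [l]) :: pvAux [] ls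
    else
      pvAux (pend ++ [l]) ls

theorem pvA_inv (ls : List String) : ∀ (qs pend : List String),
    (ls.foldl pvStepA (qs, pend)).1 = qs ++ pvAux pend ls := by
  induction ls with
  | nil => intro qs pend; simp [pvAux]
  | cons l ls ih =>
    intro qs pend
    rw [List.foldl_cons]
    by_cases h : pvIsB l = true
    · have hstp : pvStepA (qs, pend) l = (qs ++ [PySem.Str.join "" (pend ++ [l])], []) := by
        simp [pvStepA, h]
      rw [hstp, ih]
      simp [pvAux, h]
    · simp only [Bool.not_eq_true] at h
      have hstp : pvStepA (qs, pend) l = (qs, pend ++ [l]) := by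
        simp [pvStepA, h]
      rw [hstp, ih]
      simp [pvAux, h]

theorem pvB_inv (F : List String) (ls : List String) :
    ∀ (sN startN : Nat) (acc pend : List String),
    F.drop startN = pend ++ ls → sN = startN + pend.length →
    (((PySem.List.enumerate ls (sN : Int)).filterMap
        (fun p => if pvIsB p.2 then some p.1 else none)).foldl
      (pvStepB F) (acc, (startN : Int))).1 = acc ++ pvAux pend ls := by
  induction ls with
  | nil => intro sN startN acc pend _ _; simp [PySem.List.enumerate_nil, pvAux]
  | cons l ls ih =>
    intro sN startN acc pend hdrop hs
    rw [PySem.List.enumerate_cons]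
    have hstep : ((sN : Int) + 1) = ((sN + 1 : Nat) : Int) := by push_cast; ring
    by_cases h : pvIsB l = true
    · have hslice : PySem.List.slice F (some (startN : Int)) (some ((sN : Int) + 1))
          = pend ++ [l] := by
        rw [hstep, PySem.List.slice_natCast, hdrop, hs]
        have hl : startN + pend.length + 1 - startN = pend.length + 1 := by omega
        rw [hl]
        simp [List.take_append]
      have hdrop' : F.drop (sN + 1) = ([] : List String) ++ ls := by
        have h2 := congrArg (List.drop (pend.length + 1)) hdrop
        rw [List.drop_drop] at h2
        simp at h2
        rw [show sN + 1 = startN + (pend.length + 1) from by omega]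
        simpa using h2
      simp only [List.filterMap_cons, h, if_pos, List.foldl_cons]
      have hstp : pvStepB F (acc, (startN : Int)) (sN : Int)
          = (acc ++ [PySem.Str.join "" (pend ++ [l])], ((sN + 1 : Nat) : Int)) := by
        simp only [pvStepB]
        rw [hslice, hstep]
      rw [hstp, hstep, ih (sN + 1) (sN + 1) (acc ++ [PySem.Str.join "" (pend ++ [l])]) [] hdrop'
        (by simp)]
      simp [pvAux, h]
    · simp only [Bool.not_eq_true] at h
      simp only [List.filterMap_cons, h, Bool.false_eq_true, if_false, hstep]
      rw [ih (sN + 1) startN acc (pend ++ [l]) (by rw [hdrop]; simp) (by simp; omega)]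
      simp [pvAux, h]

-- ===== VERDICT (by name: the statement is the Claim_ definition above) =====
theorem text_to_queries_spec : Claim_equal_text_to_queries := by
  intro ls _
  unfold Spec_text_to_queries text_to_queries text_to_queries_alt
  rw [pvA_inv ls [] []]
  have h0 : (0 : Int) = ((0 : Nat) : Int) := rfl
  rw [h0, pvB_inv ls ls 0 0 [] [] (by simp) (by simp)]
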